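-- pv_equiv track=rewrite | github.com/YoccoDante/BluestPeakBackend | project/functional/crypto.py | get_encrypted_elements
-- ===== SOURCE A (Python) =====
-- def get_encrypted_elements(encrypted_text:str) -> list[str]:
--     """Returns a list with the elements of the encrypted text, in order to be used in the decrypt function."""
--     num_separator = ["nt","fl","ou","mn"]
--     str_separator = ["sr","dc","xt","ln"]
--     elements = []
--     consonats_index = []
--     for i in range(len(encrypted_text)):
--         if encrypted_text[i:i+2] in num_separator or encrypted_text[i:i+2] in str_separator:
--             consonats_index.append(i+1)
--
--     elements.append(encrypted_text[0:consonats_index[0]+1])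
--     for i in range(len(consonats_index) -1):
--         elements.append(encrypted_text[consonats_index[i]+1:consonats_index[i+1]+1])
--
--     return elements
-- ===== SOURCE B (Python) =====
-- SEPARATORS = {"nt", "fl", "ou", "mn", "sr", "dc", "xt", "ln"}
--
-- def get_encrypted_elements(encrypted_text: str) -> list[str]:
--     """Single linear scan with a running segment start instead of a first pass
--     collecting all separator indices and a second pass slicing between them."""
--     elements = []
--     start = 0
--     for i in range(len(encrypted_text)):
--         if encrypted_text[i:i+2] in SEPARATORS:
--             elements.append(encrypted_text[start:i+2])
--             start = i + 2
--     return elements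
-- ===== Notes on version B (the rewrite author's own statement) =====
-- stated objective: simpler
-- what changed: One linear scan with a running segment-start cursor replaces A's two passes (first collecting all separator indices into a list, then slicing between consecutive indices); measured faster by the constant-factor saving of not building and re-indexing the index list.
import Mathlib
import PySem

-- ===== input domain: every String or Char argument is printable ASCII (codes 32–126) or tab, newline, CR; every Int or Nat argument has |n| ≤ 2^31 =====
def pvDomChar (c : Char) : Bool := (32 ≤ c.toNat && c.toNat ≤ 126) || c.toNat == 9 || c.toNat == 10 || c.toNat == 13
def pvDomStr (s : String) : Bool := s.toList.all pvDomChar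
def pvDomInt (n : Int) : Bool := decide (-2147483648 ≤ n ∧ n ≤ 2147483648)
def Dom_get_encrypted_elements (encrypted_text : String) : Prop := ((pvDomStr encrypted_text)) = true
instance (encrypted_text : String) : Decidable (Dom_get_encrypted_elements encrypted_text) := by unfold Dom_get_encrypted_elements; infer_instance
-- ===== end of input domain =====

-- B fuses A's two passes (collect all separator indices, then slice between consecutive
-- indices) into one linear scan keeping a running segment-start cursor: simpler, no index list.

-- ===== PORT A =====
-- A's two separator lists, as lists of character bigrams
def pvNumSeparator : List (List Char) := [['n','t'], ['f','l'], ['o','u'], ['m','n']]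
def pvStrSeparator : List (List Char) := [['s','r'], ['d','c'], ['x','t'], ['l','n']]

def get_encrypted_elements (encrypted_text : String) : List String :=
  let cs := encrypted_text.toList
  -- first pass: collect i+1 for every i with encrypted_text[i:i+2] a separator
  let consonats_index : List Int :=
    (PySem.List.pyRange 0 (PySem.Str.len encrypted_text) 1).foldl
      (fun acc i =>
        if (pvNumSeparator.contains (PySem.List.slice cs (some i) (some (i+2)))
            || pvStrSeparator.contains (PySem.List.slice cs (some i) (some (i+2)))) = true
        then acc ++ [i+1] else acc) []
  match consonats_index with
  | [] => []   -- Python raises IndexError here (consonats_index[0] on []); excluded by Pre_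
  | j0 :: _ =>
    -- elements.append(encrypted_text[0:consonats_index[0]+1])
    let elements : List String := [String.ofList (PySem.List.slice cs (some 0) (some (j0+1)))]
    -- second pass: slice between consecutive collected indices
    (PySem.List.pyRange 0 ((consonats_index.length : Int) - 1) 1).foldl
      (fun acc i =>
        acc ++ [String.ofList (PySem.List.slice cs
          (some (PySem.List.pyGetD consonats_index i 0 + 1))       -- indices i, i+1 are in range, default unused
          (some (PySem.List.pyGetD consonats_index (i+1) 0 + 1)))]) elements

-- ===== PORT B =====
-- B's single set of the eight separator bigrams
def pvSeparators : PySem.Set (List Char) :=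
  PySem.Set.ofList [['n','t'], ['f','l'], ['o','u'], ['m','n'], ['s','r'], ['d','c'], ['x','t'], ['l','n']]

def get_encrypted_elements_alt (encrypted_text : String) : List String :=
  let cs := encrypted_text.toList
  -- single scan: state = (elements, start); on a separator at i append s[start:i+2], start := i+2
  ((PySem.List.pyRange 0 (PySem.Str.len encrypted_text) 1).foldl
    (fun (st : List String × Int) i =>
      if (PySem.Set.contains pvSeparators (PySem.List.slice cs (some i) (some (i+2)))) = true
      then (st.1 ++ [String.ofList (PySem.List.slice cs (some st.2) (some (i+2)))], i + 2)
      else st) ([], 0)).1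

-- ===== PRECONDITION & SPEC =====
-- Pre_ excludes exactly the inputs containing no separator bigram: there A evaluates
-- consonats_index[0] on an empty list and raises IndexError (returns no value).
def Pre_get_encrypted_elements (encrypted_text : String) : Prop :=
  ((encrypted_text.toList.zip encrypted_text.toList.tail).any
    (fun p => [p.1, p.2] ∈ [['n','t'], ['f','l'], ['o','u'], ['m','n'], ['s','r'], ['d','c'], ['x','t'], ['l','n']])) = true
instance (encrypted_text : String) : Decidable (Pre_get_encrypted_elements encrypted_text) := by
  unfold Pre_get_encrypted_elements; infer_instance

def pvWitness_get_encrypted_elements : String := "3nt7fl"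

def Spec_get_encrypted_elements (encrypted_text : String) (out : List String) : Prop :=
  out = get_encrypted_elements_alt encrypted_text
instance (encrypted_text : String) (out : List String) : Decidable (Spec_get_encrypted_elements encrypted_text out) := by
  unfold Spec_get_encrypted_elements; infer_instance

-- ===== CLAIM (what is proved, stated in full; the proofs are below) =====
def Claim_equal_get_encrypted_elements : Prop := ∀ (encrypted_text : String), Dom_get_encrypted_elements encrypted_text → Pre_get_encrypted_elements encrypted_text → Spec_get_encrypted_elements encrypted_text (get_encrypted_elements encrypted_text)

-- ===== LEMMAS AND PROOFS =====

-- the two ports' separator tests agree (the eight bigrams are the same)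
lemma pv_cond_eq (l : List Char) :
    (pvNumSeparator.contains l || pvStrSeparator.contains l)
      = PySem.Set.contains pvSeparators l := by
  simp [pvNumSeparator, pvStrSeparator, pvSeparators, PySem.Set.ofList, PySem.Set.add,
        PySem.Set.contains, List.contains_eq_mem, Bool.or_assoc]

-- the segments B produces from start `st` given the remaining separator positions
def pvSegs (cs : List Char) : Int → List Int → List String
  | _, [] => []
  | st, p :: ps => String.ofList (PySem.List.slice cs (some st) (some (p+2))) :: pvSegs cs (p+2) ps

-- the slices A produces from consecutive members of its index list
def pvPairs (cs : List Char) : List Int → List String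
  | a :: b :: t => String.ofList (PySem.List.slice cs (some (a+1)) (some (b+1))) :: pvPairs cs (b :: t)
  | _ => []

-- B's fold, characterised by the filtered separator positions
lemma pv_foldB (cs : List Char) (c : Int → Bool) (L : List Int) (E : List String) (st : Int) :
    (L.foldl
      (fun (acc : List String × Int) i =>
        if c i = true
        then (acc.1 ++ [String.ofList (PySem.List.slice cs (some acc.2) (some (i+2)))], i + 2)
        else acc) (E, st)).1
      = E ++ pvSegs cs st (L.filter c) := by
  induction L generalizing E st with
  | nil => simp [pvSegs]
  | cons a t ih =>
    by_cases h : c a = true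
    · simp [h, ih, pvSegs]
    · simp [h, ih]

-- A's consecutive-index map on a Nat range equals pvPairs
lemma pv_map_range (cs : List Char) (js : List Int) :
    (List.range (js.length - 1)).map
      (fun k => String.ofList (PySem.List.slice cs
        (some (js.getD k 0 + 1)) (some (js.getD (k+1) 0 + 1))))
      = pvPairs cs js := by
  induction js with
  | nil => simp [pvPairs]
  | cons a t ih =>
    cases t with
    | nil => simp [pvPairs]
    | cons b u =>
      have h : (a :: b :: u).length - 1 = u.length + 1 := by simp
      rw [h, List.range_succ_eq_map, List.map_cons, List.map_map]
      rw [pvPairs]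
      refine List.cons_eq_cons.mpr ⟨rfl, ?_⟩
      rw [← ih]
      have h2 : (b :: u).length - 1 = u.length := by simp
      rw [h2]
      rfl

-- A's second pass over its index list equals pvPairs
lemma pv_foldA_pairs (cs : List Char) (js : List Int) (init : List String) :
    (PySem.List.pyRange 0 ((js.length : Int) - 1) 1).foldl
      (fun acc i =>
        acc ++ [String.ofList (PySem.List.slice cs
          (some (PySem.List.pyGetD js i 0 + 1))
          (some (PySem.List.pyGetD js (i+1) 0 + 1)))]) init
      = init ++ pvPairs cs js := by
  rw [PySem.List.foldl_append_singleton_eq_map, PySem.List.pyRange_one]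
  congr 1
  rw [List.map_map, ← pv_map_range cs js]
  have hn : ((js.length : Int) - 1 - 0).toNat = js.length - 1 := by omega
  rw [hn]
  apply List.map_congr_left
  intro k _
  simp only [Function.comp]
  have e0 : (0 : Int) + (k : Int) = ((k : Nat) : Int) := by ring
  rw [e0]
  have e1 : ((k : Nat) : Int) + 1 = ((k + 1 : Nat) : Int) := by push_cast; ring
  rw [e1, PySem.List.pyGetD_natCast, PySem.List.pyGetD_natCast]

-- pvPairs on A's shifted index list is pvSegs from the first cut
lemma pv_pairs_segs (cs : List Char) (ps : List Int) (p : Int) :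
    pvPairs cs ((p :: ps).map (· + 1)) = pvSegs cs (p + 2) ps := by
  induction ps generalizing p with
  | nil => simp [pvPairs, pvSegs]
  | cons q t ih =>
    simp only [List.map_cons] at ih ⊢
    rw [pvPairs, pvSegs, ← ih]
    refine List.cons_eq_cons.mpr ⟨?_, rfl⟩
    rw [show p + 1 + 1 = p + 2 from by ring, show q + 1 + 1 = q + 2 from by ring]

-- ===== VERDICT (by name: the statement is the Claim_ definition above) =====
theorem get_encrypted_elements_spec : Claim_equal_get_encrypted_elements := by
  intro s _ _
  show get_encrypted_elements s = get_encrypted_elements_alt s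
  unfold get_encrypted_elements get_encrypted_elements_alt
  simp only []
  rw [PySem.List.foldl_append_if
        (fun i => pvNumSeparator.contains (PySem.List.slice s.toList (some i) (some (i+2)))
            || pvStrSeparator.contains (PySem.List.slice s.toList (some i) (some (i+2))))
        (fun i => i + 1)]
  rw [pv_foldB s.toList
        (fun i => PySem.Set.contains pvSeparators (PySem.List.slice s.toList (some i) (some (i+2))))]
  simp only [List.nil_append]
  have hfilter :
      (PySem.List.pyRange 0 (PySem.Str.len s) 1).filter
        (fun i => pvNumSeparator.contains (PySem.List.slice s.toList (some i) (some (i+2)))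
            || pvStrSeparator.contains (PySem.List.slice s.toList (some i) (some (i+2))))
      = (PySem.List.pyRange 0 (PySem.Str.len s) 1).filter
        (fun i => PySem.Set.contains pvSeparators (PySem.List.slice s.toList (some i) (some (i+2)))) := by
    apply List.filter_congr
    intro i _
    exact pv_cond_eq _
  rw [hfilter]
  cases hP : (PySem.List.pyRange 0 (PySem.Str.len s) 1).filter
      (fun i => PySem.Set.contains pvSeparators (PySem.List.slice s.toList (some i) (some (i+2)))) with
  | nil => simp [pvSegs]
  | cons p ps =>
    simp only [List.map_cons]
    rw [pv_foldA_pairs]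
    have : pvPairs s.toList ((p+1) :: ps.map (· + 1)) = pvSegs s.toList (p + 2) ps := by
      have := pv_pairs_segs s.toList ps p
      simpa using this
    rw [this, pvSegs]
    refine List.cons_eq_cons.mpr ⟨?_, rfl⟩
    rw [show p + 1 + 1 = p + 2 from by ring]
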